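-- pv_equiv track=rewrite | github.com/pypi-data/pypi-mirror-324 | packages/python-release-master/python_release_master-0.5.19-py3-none-any.whl/python_release_master/python_release_master/core/changelog.py | _format_commit
-- ===== SOURCE A (Python) =====
-- def _format_commit(commit: str) -> str:
--     """Format commit message for changelog.
--
--     Args:
--         commit: Raw commit message
--
--     Returns:
--         Formatted commit message
--     """
--     # Remove commit hash
--     if " " in commit:
--         commit = commit.split(" ", 1)[1]
--
--     # Clean up conventional commit prefixes
--     prefixes = ["feat", "fix", "docs", "style", "refactor", "test", "chore"]
--     for prefix in prefixes:
--         if commit.startswith(f"{prefix}:"):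
--             commit = commit[len(prefix) + 1:].strip()
--             break
--         if commit.startswith(f"{prefix}("):
--             scope_end = commit.find(")")
--             if scope_end != -1:
--                 commit = commit[scope_end + 2:].strip()
--                 break
--
--     # Capitalize first letter
--     if commit:
--         commit = commit[0].upper() + commit[1:]
--
--     return commit
-- ===== SOURCE B (Python) =====
-- _PREFIXES = ("feat", "fix", "docs", "style", "refactor", "test", "chore")
--
--
-- def _format_commit(commit: str) -> str:
--     """Format commit message for changelog (single-scan re-implementation)."""
--     # Remove commit hash
--     if " " in commit:
--         commit = commit.split(" ", 1)[1]
--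
--     # Scan once to the first ':' or '(' and check the head word against the
--     # known conventional-commit types, instead of testing every prefix.
--     n = len(commit)
--     i = 0
--     while i < n and commit[i] not in ":(":
--         i += 1
--     if i < n and commit[:i] in _PREFIXES:
--         if commit[i] == ":":
--             commit = commit[i + 1:].strip()
--         else:
--             j = commit.find(")")
--             if j != -1:
--                 commit = commit[j + 2:].strip()
--
--     # Capitalize first letter
--     if commit:
--         commit = commit[0].upper() + commit[1:]
--
--     return commit
-- ===== Notes on version B (the rewrite author's own statement) =====
-- stated objective: alternative
-- what changed: Replaces the 7-iteration prefix loop (each iteration doing up to two startswith tests) with a single scan to the first delimiter character followed by one membership test of the head word against the prefix set.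
import Mathlib
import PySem

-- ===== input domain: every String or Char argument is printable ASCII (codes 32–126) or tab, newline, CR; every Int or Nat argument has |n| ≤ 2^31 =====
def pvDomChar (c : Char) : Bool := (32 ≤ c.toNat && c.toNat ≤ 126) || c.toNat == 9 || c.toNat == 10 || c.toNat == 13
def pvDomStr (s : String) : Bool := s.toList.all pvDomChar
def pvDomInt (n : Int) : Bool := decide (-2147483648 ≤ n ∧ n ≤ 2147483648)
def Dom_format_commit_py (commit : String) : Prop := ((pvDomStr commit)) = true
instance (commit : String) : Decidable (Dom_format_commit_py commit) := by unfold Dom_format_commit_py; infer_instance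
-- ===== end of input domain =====

-- B replaces A's 7-iteration prefix loop by one scan to the first delimiter plus a single
-- membership test of the head word; same results, alternative algorithm (not claimed faster).


-- helpers shared verbatim by both Pythons (identical lines in Source A and Source B):
-- `commit = commit.split(" ", 1)[1]` guarded by `" " in commit`, and the final capitalization.
def pvHashStrip (commit : String) : String :=
  if PySem.Str.isIn " " commit then
    (PySem.List.pyGet? ((PySem.Str.splitMax? commit " " 1).getD []) 1).getD commit
  else commit

def pvCapFirst : List Char → List Char
  | [] => []
  | c :: cs => PySem.Chars.upperChar c :: cs

def pvPrefixes : List (List Char) :=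
  [['f','e','a','t'], ['f','i','x'], ['d','o','c','s'], ['s','t','y','l','e'],
   ['r','e','f','a','c','t','o','r'], ['t','e','s','t'], ['c','h','o','r','e']]

-- ===== PORT A =====
-- A's for-loop over the prefixes, with `break` = returning, `continue` = recursing.
def pvLoopA : List (List Char) → List Char → List Char
  | [], c => c
  | p :: ps, c =>
    if PySem.Chars.startswith c (p ++ [':']) then
      PySem.Chars.strip (PySem.Chars.slice c (some ((p.length : Int) + 1)) none)
    else if PySem.Chars.startswith c (p ++ ['(']) then
      let scopeEnd := PySem.Chars.find c [')']
      if scopeEnd ≠ -1 then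
        PySem.Chars.strip (PySem.Chars.slice c (some (scopeEnd + 2)) none)
      else pvLoopA ps c
    else pvLoopA ps c

def format_commit_py (commit : String) : String :=
  let c := (pvHashStrip commit).toList
  String.ofList (pvCapFirst (pvLoopA pvPrefixes c))

-- ===== PORT B =====
-- B's while-loop: index of the first ':' or '(' in the commit.
def pvScanB : List Char → Nat
  | [] => 0
  | ch :: cs => if ch = ':' ∨ ch = '(' then 0 else pvScanB cs + 1

def pvCoreB (c : List Char) : List Char :=
  let i := pvScanB c
  if i < c.length ∧ c.take i ∈ pvPrefixes then
    if c.getD i ' ' = ':' then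
      PySem.Chars.strip (c.drop (i + 1))
    else
      let j := PySem.Chars.find c [')']
      if j ≠ -1 then PySem.Chars.strip (PySem.Chars.slice c (some (j + 2)) none)
      else c
  else c

def format_commit_py_alt (commit : String) : String :=
  let c := (pvHashStrip commit).toList
  String.ofList (pvCapFirst (pvCoreB c))

-- ===== PRECONDITION & SPEC =====
def Spec_format_commit_py (commit : String) (out : String) : Prop := out = format_commit_py_alt commit
instance (commit : String) (out : String) : Decidable (Spec_format_commit_py commit out) := by unfold Spec_format_commit_py; infer_instance

-- ===== CLAIM (what is proved, stated in full; the proofs are below) =====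
def Claim_equal_format_commit_py : Prop := ∀ (commit : String), Dom_format_commit_py commit → Spec_format_commit_py commit (format_commit_py commit)

-- ===== LEMMAS AND PROOFS =====

-- B's branch body, parametrised by the prefix list (proof-side generalisation of pvCoreB).
def pvSel (ps : List (List Char)) (c : List Char) : List Char :=
  if pvScanB c < c.length ∧ c.take (pvScanB c) ∈ ps then
    if c.getD (pvScanB c) ' ' = ':' then
      PySem.Chars.strip (c.drop (pvScanB c + 1))
    else
      if PySem.Chars.find c [')'] ≠ -1 then
        PySem.Chars.strip (PySem.Chars.slice c (some (PySem.Chars.find c [')'] + 2)) none)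
      else c
  else c

lemma pvCoreB_eq_sel (c : List Char) : pvCoreB c = pvSel pvPrefixes c := by
  simp [pvCoreB, pvSel]

lemma pvScanB_of_prefix (p : List Char) (d : Char) (c : List Char)
    (hp : ∀ x ∈ p, ¬(x = ':' ∨ x = '(')) (hd : d = ':' ∨ d = '(')
    (h : (p ++ [d]) <+: c) : pvScanB c = p.length := by
  induction p generalizing c with
  | nil =>
    obtain ⟨t, ht⟩ := h
    subst ht
    simp [pvScanB, if_pos hd]
  | cons a p ih =>
    obtain ⟨t, ht⟩ := h
    have ha : ¬(a = ':' ∨ a = '(') := hp a (by simp)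
    have hc : c = a :: (p ++ [d] ++ t) := by rw [← ht]; simp
    subst hc
    have hstep : pvScanB (a :: (p ++ [d] ++ t)) = pvScanB (p ++ [d] ++ t) + 1 := by
      simp [pvScanB, ha]
    rw [hstep, ih (p ++ [d] ++ t) (fun x hx => hp x (List.mem_cons_of_mem a hx)) ⟨t, rfl⟩]
    simp

lemma pvGetD_of_prefix (p : List Char) (d : Char) (c : List Char)
    (h : (p ++ [d]) <+: c) : c.getD p.length ' ' = d := by
  obtain ⟨t, ht⟩ := h
  subst ht
  simp [List.getD]

lemma pvLen_of_prefix (p : List Char) (d : Char) (c : List Char)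
    (h : (p ++ [d]) <+: c) : p.length < c.length := by
  have := h.length_le
  simp at this; omega

lemma pvTake_of_prefix (p : List Char) (d : Char) (c : List Char)
    (h : (p ++ [d]) <+: c) : c.take p.length = p := by
  obtain ⟨t, ht⟩ := h
  subst ht
  rw [List.append_assoc]
  simp

-- the character at the scan position is a delimiter, and head++[it] is a prefix of c
lemma pvScanB_lt (c : List Char) (h : pvScanB c < c.length) :
    (c.getD (pvScanB c) ' ' = ':' ∨ c.getD (pvScanB c) ' ' = '(') ∧
    (c.take (pvScanB c) ++ [c.getD (pvScanB c) ' ']) <+: c := by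
  induction c with
  | nil => simp at h
  | cons a cs ih =>
    by_cases ha : a = ':' ∨ a = '('
    · constructor
      · simpa [pvScanB, if_pos ha, List.getD] using ha
      · simp only [pvScanB, if_pos ha, List.take_zero, List.nil_append]
        exact ⟨cs, by simp [List.getD]⟩
    · have hs : pvScanB (a :: cs) = pvScanB cs + 1 := by simp [pvScanB, ha]
      rw [hs] at h ⊢
      simp only [List.length_cons] at h
      obtain ⟨h1, h2⟩ := ih (by omega)
      have hg : (a :: cs).getD (pvScanB cs + 1) ' ' = cs.getD (pvScanB cs) ' ' := by
        simp [List.getD]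
      rw [hg]
      refine ⟨h1, ?_⟩
      rw [List.take_succ_cons]
      exact List.cons_prefix_cons.mpr ⟨rfl, h2⟩

lemma pvStartswith_iff (c p : List Char) :
    PySem.Chars.startswith c p = true ↔ p <+: c := PySem.Chars.startswith_iff c p

lemma pvLoopA_noMatch (ps : List (List Char)) (c : List Char)
    (h : ∀ p ∈ ps, ¬((p ++ [':']) <+: c) ∧ ¬((p ++ ['(']) <+: c)) :
    pvLoopA ps c = c := by
  induction ps with
  | nil => rfl
  | cons p ps ih =>
    have hp := h p (by simp)
    have h1 : PySem.Chars.startswith c (p ++ [':']) = false := by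
      rw [Bool.eq_false_iff, Ne, pvStartswith_iff]; exact hp.1
    have h2 : PySem.Chars.startswith c (p ++ ['(']) = false := by
      rw [Bool.eq_false_iff, Ne, pvStartswith_iff]; exact hp.2
    simp only [pvLoopA, h1, h2, Bool.false_eq_true, if_neg, not_false_iff]
    exact ih (fun q hq => h q (by simp [hq]))

lemma pvLoopA_eq_sel (ps : List (List Char)) (c : List Char)
    (hps : ∀ p ∈ ps, ∀ x ∈ p, ¬(x = ':' ∨ x = '('))
    (hnd : ps.Nodup) :
    pvLoopA ps c = pvSel ps c := by
  induction ps with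
  | nil => simp [pvLoopA, pvSel]
  | cons p ps ih =>
    have hpnd : ∀ x ∈ p, ¬(x = ':' ∨ x = '(') := hps p (by simp)
    by_cases hc : (p ++ [':']) <+: c
    · -- colon branch
      have hscan : pvScanB c = p.length := pvScanB_of_prefix p ':' c hpnd (Or.inl rfl) hc
      have hlen : p.length < c.length := pvLen_of_prefix p ':' c hc
      have htake : c.take p.length = p := pvTake_of_prefix p ':' c hc
      have hget : c.getD p.length ' ' = ':' := pvGetD_of_prefix p ':' c hc
      have hb : PySem.Chars.startswith c (p ++ [':']) = true := (pvStartswith_iff _ _).2 hc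
      have hcond : pvScanB c < c.length ∧ c.take (pvScanB c) ∈ p :: ps := by
        rw [hscan, htake]; exact ⟨hlen, by simp⟩
      have hA : pvLoopA (p :: ps) c =
          PySem.Chars.strip (PySem.Chars.slice c (some ((p.length : Int) + 1)) none) := by
        unfold pvLoopA; rw [if_pos hb]
      have hB : pvSel (p :: ps) c = PySem.Chars.strip (c.drop (p.length + 1)) := by
        unfold pvSel
        rw [if_pos hcond, hscan, hget, if_pos rfl]
      rw [hA, hB]
      congr 1
      rw [PySem.Chars.slice_eq_listSlice]
      have hcast : ((p.length : Int) + 1) = (((p.length + 1 : Nat)) : Int) := by push_cast; ring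
      rw [hcast, PySem.List.slice_from_natCast]
    · by_cases hc2 : (p ++ ['(']) <+: c
      · -- paren branch
        have hscan : pvScanB c = p.length := pvScanB_of_prefix p '(' c hpnd (Or.inr rfl) hc2
        have hlen : p.length < c.length := pvLen_of_prefix p '(' c hc2
        have htake : c.take p.length = p := pvTake_of_prefix p '(' c hc2
        have hget : c.getD p.length ' ' = '(' := pvGetD_of_prefix p '(' c hc2
        have hb : PySem.Chars.startswith c (p ++ [':']) = false := by
          rw [Bool.eq_false_iff, Ne, pvStartswith_iff]; exact hc
        have hb2 : PySem.Chars.startswith c (p ++ ['(']) = true := (pvStartswith_iff _ _).2 hc2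
        have hcond : pvScanB c < c.length ∧ c.take (pvScanB c) ∈ p :: ps := by
          rw [hscan, htake]; exact ⟨hlen, by simp⟩
        have hget' : ¬ (c.getD (pvScanB c) ' ' = ':') := by rw [hscan, hget]; decide
        by_cases hf : PySem.Chars.find c [')'] ≠ -1
        · have hA : pvLoopA (p :: ps) c =
              PySem.Chars.strip (PySem.Chars.slice c (some (PySem.Chars.find c [')'] + 2)) none) := by
            unfold pvLoopA
            rw [if_neg (by simp [hb]), if_pos hb2]
            simp only [if_pos hf]
          have hB : pvSel (p :: ps) c =
              PySem.Chars.strip (PySem.Chars.slice c (some (PySem.Chars.find c [')'] + 2)) none) := by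
            unfold pvSel
            rw [if_pos hcond, if_neg hget', if_pos hf]
          rw [hA, hB]
        · -- find = -1: A continues the loop, but no other prefix can match; B returns c
          have hA : pvLoopA (p :: ps) c = pvLoopA ps c := by
            unfold pvLoopA
            rw [if_neg (by simp [hb]), if_pos hb2]
            simp only [if_neg hf]
            conv_lhs => rw [pvLoopA.eq_def]
          have hnm : pvLoopA ps c = c := by
            refine pvLoopA_noMatch ps c (fun q hq => ⟨?_, ?_⟩) <;> intro hqc
            · have hq1 : pvScanB c = q.length :=
                pvScanB_of_prefix q ':' c (hps q (by simp [hq])) (Or.inl rfl) hqc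
              have hq2 : c.take q.length = q := pvTake_of_prefix q ':' c hqc
              have hqp : q = p := by rw [← hq2, ← htake, hq1.symm.trans hscan]
              subst hqp
              have hcontra := pvGetD_of_prefix q ':' c hqc
              rw [hget] at hcontra; exact absurd hcontra (by decide)
            · have hq1 : pvScanB c = q.length :=
                pvScanB_of_prefix q '(' c (hps q (by simp [hq])) (Or.inr rfl) hqc
              have hq2 : c.take q.length = q := pvTake_of_prefix q '(' c hqc
              have hqp : q = p := by rw [← hq2, ← htake, hq1.symm.trans hscan]
              subst hqp
              exact (List.nodup_cons.1 hnd).1 hq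
          have hB : pvSel (p :: ps) c = c := by
            unfold pvSel
            rw [if_pos hcond, if_neg hget', if_neg hf]
          rw [hA, hnm, hB]
      · -- no match for p: drop it on both sides
        have hb : PySem.Chars.startswith c (p ++ [':']) = false := by
          rw [Bool.eq_false_iff, Ne, pvStartswith_iff]; exact hc
        have hb2 : PySem.Chars.startswith c (p ++ ['(']) = false := by
          rw [Bool.eq_false_iff, Ne, pvStartswith_iff]; exact hc2
        have ihv := ih (fun q hq => hps q (by simp [hq])) (List.nodup_cons.1 hnd).2
        have hA : pvLoopA (p :: ps) c = pvLoopA ps c := by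
          unfold pvLoopA
          rw [if_neg (by simp [hb]), if_neg (by simp [hb2])]
          conv_lhs => rw [pvLoopA.eq_def]
        rw [hA, ihv]
        by_cases hcond : pvScanB c < c.length ∧ c.take (pvScanB c) ∈ ps
        · have hcond2 : pvScanB c < c.length ∧ c.take (pvScanB c) ∈ p :: ps :=
            ⟨hcond.1, List.mem_cons_of_mem p hcond.2⟩
          unfold pvSel
          rw [if_pos hcond, if_pos hcond2]
        · have hcond2 : ¬ (pvScanB c < c.length ∧ c.take (pvScanB c) ∈ p :: ps) := by
            rintro ⟨hlt, hmem⟩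
            rcases List.mem_cons.1 hmem with hEq | hmem'
            · obtain ⟨hdel, hpre⟩ := pvScanB_lt c hlt
              rcases hdel with hd | hd
              · exact hc (by rw [← hEq, ← hd]; exact hpre)
              · exact hc2 (by rw [← hEq, ← hd]; exact hpre)
            · exact hcond ⟨hlt, hmem'⟩
          unfold pvSel
          rw [if_neg hcond, if_neg hcond2]

lemma pvPrefixes_nonDelim : ∀ p ∈ pvPrefixes, ∀ x ∈ p, ¬(x = ':' ∨ x = '(') := by
  simp [pvPrefixes]

lemma pvPrefixes_nodup : pvPrefixes.Nodup := by
  simp [pvPrefixes]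

-- ===== VERDICT (by name: the statement is the Claim_ definition above) =====
theorem format_commit_py_spec : Claim_equal_format_commit_py := by
  intro commit _
  show String.ofList (pvCapFirst (pvLoopA pvPrefixes (pvHashStrip commit).toList)) =
       String.ofList (pvCapFirst (pvCoreB (pvHashStrip commit).toList))
  rw [pvCoreB_eq_sel, pvLoopA_eq_sel pvPrefixes _ pvPrefixes_nonDelim pvPrefixes_nodup]
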